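-- pv_equiv track=rewrite | github.com/Kacperon/Projekty | ASD/kolosy/kol1/kol1 — kopia.py | maxrank
-- ===== SOURCE A (Python) =====
-- def maxrank(T):
--   n=len(T)
--   wynik=0
--   maxelement=T[n-1]
--   i=n-1
--   while i>wynik:
--     maxi=0
--     element=T[i]
--     if i>maxi and element>maxelement:
--       maxelement=element
--       for j in range(i-1,-1,-1):
--         if element>T[j]:
--           maxi+=1
--     wynik=max(maxi,wynik)
--     i-=1
--   return wynik
-- ===== SOURCE B (Python) =====
-- def maxrank(T):
--     n = len(T)
--     # Sort once.  For a suffix leader i (T[i] greater than everything to its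
--     # right), ALL n-1-i elements to its right are smaller than T[i], so
--     #   count of smaller elements left of i
--     #     = (count of elements of T smaller than T[i]) - (n - 1 - i).
--     # Leaders found right-to-left have strictly increasing values, so a single
--
--     # smaller-counts in O(n log n) total, with no per-leader scan.
--     S = sorted(T)
--     best = 0
--     m = T[-1]
--     p = 0
--     for i in range(n - 2, 0, -1):
--         if T[i] > m:
--             m = T[i]
--             while p < n and S[p] < m:
--                 p += 1
--             c = p - (n - 1 - i)
--             if c > best:
--                 best = c
--     return best
-- ===== Notes on version B (the rewrite author's own statement) =====
-- stated objective: faster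
-- what changed: B sorts T once and replaces every per-leader prefix-counting scan by the identity left-smaller(i) = (#elements of T below T[i]) - (n-1-i), evaluated with a single forward pointer walking the sorted array across the value-increasing leaders, so no inner counting loop exists at all.
import Mathlib
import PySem

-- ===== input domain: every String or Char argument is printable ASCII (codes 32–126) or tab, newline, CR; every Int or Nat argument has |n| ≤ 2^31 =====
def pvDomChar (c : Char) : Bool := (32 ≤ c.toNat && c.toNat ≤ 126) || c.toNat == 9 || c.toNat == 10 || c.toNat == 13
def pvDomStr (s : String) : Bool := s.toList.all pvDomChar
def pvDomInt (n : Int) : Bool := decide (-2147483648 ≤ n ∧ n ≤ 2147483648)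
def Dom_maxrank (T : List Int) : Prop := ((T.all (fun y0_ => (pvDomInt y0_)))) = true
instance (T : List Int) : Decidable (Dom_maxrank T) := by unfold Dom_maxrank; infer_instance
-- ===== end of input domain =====

-- B sorts T once and walks one pointer through the sorted copy at the suffix-leader
-- positions, using the identity left-smaller(i) = (#elements of T below T[i]) - (n-1-i),
-- valid at leaders; no per-leader prefix-counting scan (objective: faster, O(n log n)).

-- ===== PORT A =====
-- inner loop: 'for j in range(i-1,-1,-1): if element > T[j]: maxi += 1'
def maxrankCount (T : List Int) (element : Int) (i : Int) : Int :=
  (PySem.List.pyRange (i - 1) (-1) (-1)).foldl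
    (fun maxi j => if element > PySem.List.pyGetD T j 0 then maxi + 1 else maxi) 0

-- the 'while i > wynik' loop, i ported as a Nat (it starts at n-1 and decreases by 1)
def maxrankLoop (T : List Int) : Int → Int → Nat → Int
  | _, wynik, 0 => wynik
  | maxelement, wynik, i + 1 =>
    if ((i + 1 : Nat) : Int) > wynik then
      let element := PySem.List.pyGetD T ((i + 1 : Nat) : Int) 0
      if ((i + 1 : Nat) : Int) > 0 ∧ element > maxelement then
        maxrankLoop T element (max (maxrankCount T element ((i + 1 : Nat) : Int)) wynik) i
      else
        maxrankLoop T maxelement (max 0 wynik) i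
    else wynik

def maxrank (T : List Int) : Int :=
  maxrankLoop T (PySem.List.pyGetD T ((T.length : Int) - 1) 0) 0 (T.length - 1)

-- ===== PORT B =====
-- 'while p < n and S[p] < m: p += 1'
def bAdvance (S : List Int) (m : Int) (p : Nat) : Nat :=
  if h : p < S.length then
    if PySem.List.pyGetD S (p : Int) 0 < m then bAdvance S m (p + 1) else p
  else p
termination_by S.length - p
decreasing_by omega

def maxrank_alt (T : List Int) : Int :=
  let S := PySem.List.sorted T (fun x => x) false
  let st :=
    (PySem.List.pyRange ((T.length : Int) - 2) 0 (-1)).foldl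
      (fun (st : Int × Int × Nat) i =>
        if PySem.List.pyGetD T i 0 > st.2.1 then
          let m' := PySem.List.pyGetD T i 0
          let p' := bAdvance S m' st.2.2
          let c := (p' : Int) - ((T.length : Int) - 1 - i)
          (if c > st.1 then c else st.1, m', p')
        else st)
      (0, PySem.List.pyGetD T (-1) 0, 0)
  st.1

-- ===== PRECONDITION & SPEC =====
-- Pre_ excludes only the empty list, on which A's T[n-1] raises IndexError.
def Pre_maxrank (T : List Int) : Prop := T ≠ []
instance (T : List Int) : Decidable (Pre_maxrank T) := by unfold Pre_maxrank; infer_instance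
def pvWitness_maxrank : List Int := [3, 1, 2]

def Spec_maxrank (T : List Int) (out : Int) : Prop := out = maxrank_alt T
instance (T : List Int) (out : Int) : Decidable (Spec_maxrank T out) := by unfold Spec_maxrank; infer_instance

-- ===== CLAIM (what is proved, stated in full; the proofs are below) =====
def Claim_equal_maxrank : Prop := ∀ (T : List Int), Dom_maxrank T → Pre_maxrank T → Spec_maxrank T (maxrank T)

-- ===== LEMMAS AND PROOFS =====

-- T[i] for an in-range Nat index
def tg (T : List Int) (i : Nat) : Int := T.getD i 0
-- number of elements strictly left of i that are smaller than T[i]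
def cnt (T : List Int) (i : Nat) : Int := ((T.take i).countP (fun x => decide (x < tg T i)) : Int)
-- pure right-to-left sweep from index i down to 1: running max and max leader count
def descMax (T : List Int) : Int → Nat → Int
  | _, 0 => 0
  | maxel, i + 1 =>
    if tg T (i + 1) > maxel then max (cnt T (i + 1)) (descMax T (tg T (i + 1)) i)
    else descMax T maxel i

-- B's loop body as a named function (definitionally equal to the lambda in maxrank_alt)
def bStep (T S : List Int) (st : Int × Int × Nat) (j : Int) : Int × Int × Nat :=
  if PySem.List.pyGetD T j 0 > st.2.1 then
    (if ((bAdvance S (PySem.List.pyGetD T j 0) st.2.2 : Nat) : Int)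
          - ((T.length : Int) - 1 - j) > st.1
       then ((bAdvance S (PySem.List.pyGetD T j 0) st.2.2 : Nat) : Int)
          - ((T.length : Int) - 1 - j)
       else st.1,
     PySem.List.pyGetD T j 0, bAdvance S (PySem.List.pyGetD T j 0) st.2.2)
  else st

theorem cnt_le (T : List Int) (i : Nat) : cnt T i ≤ (i : Int) := by
  unfold cnt
  have h1 : (T.take i).countP (fun x => decide (x < tg T i)) ≤ (T.take i).length :=
    List.countP_le_length
  have h2 : (T.take i).length ≤ i := by simp [List.length_take]
  exact_mod_cast le_trans h1 h2

theorem cnt_nonneg (T : List Int) (i : Nat) : 0 ≤ cnt T i := by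
  unfold cnt; positivity

theorem descMax_nonneg (T : List Int) (maxel : Int) (i : Nat) : 0 ≤ descMax T maxel i := by
  induction i generalizing maxel with
  | zero => simp [descMax]
  | succ i ih =>
    unfold descMax
    split
    · exact le_trans (ih _) (le_max_right _ _)
    · exact ih _

theorem descMax_le (T : List Int) (maxel : Int) (i : Nat) : descMax T maxel i ≤ (i : Int) := by
  induction i generalizing maxel with
  | zero => simp [descMax]
  | succ i ih =>
    unfold descMax
    split
    · have := cnt_le T (i + 1)
      have := ih (tg T (i + 1))
      push_cast
      push_cast at this ⊢
      omega
    · have := ih maxel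
      push_cast at this ⊢
      omega

-- counting over index range = counting over the prefix
theorem rangeCount (T : List Int) (e : Int) (i : Nat) (hi : i ≤ T.length) :
    List.countP (fun k => decide (tg T k < e)) (List.range i)
      = List.countP (fun x => decide (x < e)) (T.take i) := by
  induction i with
  | zero => simp
  | succ i ih =>
    have hi' : i < T.length := by omega
    have htake : T.take (i + 1) = T.take i ++ [T[i]] := by
      rw [List.take_add_one]
      simp [List.getElem?_eq_getElem hi']
    rw [List.range_succ, htake, List.countP_append, List.countP_append,
      ih (by omega)]
    simp [tg, List.getD_eq_getElem?_getD, List.getElem?_eq_getElem hi']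

-- A's inner counting loop computes cnt
theorem count_eq_cnt (T : List Int) (i : Nat) (hi : i ≤ T.length) :
    maxrankCount T (tg T i) ((i : Nat) : Int) = cnt T i := by
  unfold maxrankCount
  have hr : PySem.List.pyRange (((i : Nat) : Int) - 1) (-1) (-1)
      = (PySem.List.pyRange 0 ((i : Nat) : Int)).reverse := by
    rw [PySem.List.pyRange_neg_one_eq_reverse]
    norm_num
  rw [hr, PySem.List.foldl_ite_add_one (fun j => tg T i > PySem.List.pyGetD T j 0),
    List.countP_reverse, PySem.List.pyRange_zero_natCast, List.countP_map]
  rw [cnt, ← rangeCount T (tg T i) i hi]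
  have hfun : ((fun j => decide (tg T i > PySem.List.pyGetD T j 0)) ∘ (fun k : Nat => (k : Int)))
      = (fun k => decide (tg T k < tg T i)) := by
    funext k
    simp [Function.comp, PySem.List.pyGetD_natCast, tg]
  rw [hfun]
  ring

-- A's while-loop = max of the accumulator and the pure sweep (early exit is harmless)
theorem loopA_eq (T : List Int) (i : Nat) (maxel wynik : Int)
    (hlen : i < T.length) (hw : 0 ≤ wynik) :
    maxrankLoop T maxel wynik i = max wynik (descMax T maxel i) := by
  induction i generalizing maxel wynik with
  | zero =>
    simp only [maxrankLoop, descMax]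
    omega
  | succ i ih =>
    have hel : PySem.List.pyGetD T ((i + 1 : Nat) : Int) 0 = tg T (i + 1) :=
      PySem.List.pyGetD_natCast T (i + 1) 0
    by_cases hcond : ((i + 1 : Nat) : Int) > wynik
    · by_cases hgt : tg T (i + 1) > maxel
      · have hc : maxrankCount T (tg T (i + 1)) ((i + 1 : Nat) : Int) = cnt T (i + 1) :=
          count_eq_cnt T (i + 1) (by omega)
        have h0 : (0 : Int) ≤ max (cnt T (i + 1)) wynik := le_trans hw (le_max_right _ _)
        simp only [maxrankLoop, hel]
        rw [if_pos hcond, if_pos ⟨by positivity, hgt⟩, hc, ih _ _ (by omega) h0,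
          descMax, if_pos hgt]
        omega
      · simp only [maxrankLoop, hel]
        rw [if_pos hcond, if_neg (by simp [hgt]), ih _ _ (by omega) (by omega),
          descMax, if_neg hgt]
        omega
    · simp only [maxrankLoop, hel]
      rw [if_neg hcond]
      have h1 := descMax_le T maxel (i + 1)
      have h2 := descMax_nonneg T maxel (i + 1)
      push_cast at h1 hcond
      omega

-- in a sorted list the elements below m are exactly the first countP-many
theorem sorted_countP_lt (S : List Int) (m : Int) (hS : S.Pairwise (· ≤ ·))
    (j : Nat) (hj : j < S.length) :
    (S.getD j 0 < m ↔ j < S.countP (fun x => decide (x < m))) := by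
  induction S generalizing j with
  | nil => simp at hj
  | cons a S ih =>
    rw [List.pairwise_cons] at hS
    obtain ⟨ha, hS'⟩ := hS
    cases j with
    | zero =>
      simp only [List.getD_cons_zero, List.countP_cons]
      constructor
      · intro h
        simp [h]
      · intro h
        by_contra hna
        have hz : S.countP (fun x => decide (x < m)) = 0 := by
          rw [List.countP_eq_zero]
          intro x hx
          have := ha x hx
          simp only [decide_eq_true_eq]
          omega
        exact absurd h (by simp [hna, hz])
    | succ j =>
      simp only [List.getD_cons_succ, List.countP_cons]
      have hj' : j < S.length := by simpa using hj
      by_cases hm : a < m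
      · rw [ih hS' j hj']
        simp [hm]
      · have hz : S.countP (fun x => decide (x < m)) = 0 := by
          rw [List.countP_eq_zero]
          intro x hx
          have := ha x hx
          simp only [decide_eq_true_eq]
          omega
        have hmem : S.getD j 0 ∈ S := by
          rw [List.getD_eq_getElem?_getD, List.getElem?_eq_getElem hj']
          exact List.getElem_mem _
        have hge := ha _ hmem
        have hsd : ¬ S.getD j 0 < m := by omega
        simp [hz, hm]
        rw [← List.getD_eq_getElem?_getD]
        omega

-- the pointer loop stops exactly at countP (< m) when started at or before it
theorem bAdvance_eq_aux (S : List Int) (m : Int) (hS : S.Pairwise (· ≤ ·)) :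
    ∀ fuel p, S.length ≤ p + fuel → p ≤ S.countP (fun x => decide (x < m)) →
      bAdvance S m p = S.countP (fun x => decide (x < m)) := by
  intro fuel
  induction fuel with
  | zero =>
    intro p hf hp
    unfold bAdvance
    rw [dif_neg (by omega)]
    have := List.countP_le_length (p := fun x => decide (x < m)) (l := S)
    omega
  | succ fuel ih =>
    intro p hf hp
    unfold bAdvance
    by_cases h : p < S.length
    · rw [dif_pos h]
      by_cases hlt : PySem.List.pyGetD S (p : Int) 0 < m
      · rw [if_pos hlt]
        apply ih (p + 1) (by omega)
        rw [PySem.List.pyGetD_natCast] at hlt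
        have := (sorted_countP_lt S m hS p h).mp hlt
        omega
      · rw [if_neg hlt]
        rw [PySem.List.pyGetD_natCast] at hlt
        have := (sorted_countP_lt S m hS p h).mpr
        omega
    · rw [dif_neg h]
      have := List.countP_le_length (p := fun x => decide (x < m)) (l := S)
      omega

theorem bAdvance_eq (S : List Int) (m : Int) (p : Nat) (hS : S.Pairwise (· ≤ ·))
    (hp : p ≤ S.countP (fun x => decide (x < m))) :
    bAdvance S m p = S.countP (fun x => decide (x < m)) :=
  bAdvance_eq_aux S m hS S.length p (by omega) hp

-- at a leader position the global below-count splits into prefix count plus suffix size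
theorem countLt_leader (T : List Int) (i : Nat) (hi : i + 1 < T.length)
    (e : Int) (he : tg T (i + 1) = e)
    (hm : ∀ x ∈ T.drop (i + 2), x < e) :
    (T.countP (fun x => decide (x < e)) : Int)
      = ((T.take (i + 1)).countP (fun x => decide (x < e)) : Int)
        + ((T.length : Int) - (i : Int) - 2) := by
  have hdrop : T.drop (i + 1) = T[i + 1] :: T.drop (i + 2) := List.drop_eq_getElem_cons hi
  have htg : T[i + 1] = e := by
    rw [← he]
    simp [tg, List.getD_eq_getElem?_getD, List.getElem?_eq_getElem hi]
  have h0 : T.countP (fun x => decide (x < e))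
      = (T.take (i + 1)).countP (fun x => decide (x < e))
        + (T.drop (i + 1)).countP (fun x => decide (x < e)) := by
    conv_lhs => rw [← List.take_append_drop (i + 1) T]
    rw [List.countP_append]
  have hsuffix : (T.drop (i + 2)).countP (fun x => decide (x < e)) = (T.drop (i + 2)).length := by
    rw [List.countP_eq_length]
    intro x hx
    simpa using hm x hx
  have hself : (if decide (e < e) = true then 1 else 0) = 0 := by simp
  rw [h0, hdrop, List.countP_cons, hsuffix, htg, hself, List.length_drop]
  push_cast [Nat.cast_sub (show i + 2 ≤ T.length by omega)]
  ring

-- B's fold = the pure sweep, under the running-max / pointer invariants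
theorem foldB (T S : List Int) (hSdef : S = PySem.List.sorted T (fun x => x) false)
    (i : Nat) (best m : Int) (p : Nat)
    (hlen : i + 1 < T.length)
    (hm : ∀ x ∈ T.drop (i + 1), x ≤ m)
    (hp : p ≤ S.countP (fun x => decide (x < m)))
    (hbest : 0 ≤ best) :
    ((PySem.List.pyRange ((i : Nat) : Int) 0 (-1)).foldl (bStep T S) (best, m, p)).1
      = max best (descMax T m i) := by
  have hSpair : S.Pairwise (· ≤ ·) := by
    rw [hSdef]
    simpa using PySem.List.sorted_pairwise T (fun x => x)
  have hSperm : S.Perm T := by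
    rw [hSdef]
    exact PySem.List.sorted_perm T (fun x => x) false
  induction i generalizing best m p with
  | zero =>
    simp only [Nat.cast_zero]
    rw [PySem.List.pyRange_neg_one_eq_nil le_rfl]
    simp only [List.foldl_nil, descMax]
    omega
  | succ i ih =>
    have hel : PySem.List.pyGetD T ((i + 1 : Nat) : Int) 0 = tg T (i + 1) :=
      PySem.List.pyGetD_natCast T (i + 1) 0
    rw [PySem.List.pyRange_neg_one_cons (by positivity)]
    have hstep : ((i + 1 : Nat) : Int) - 1 = ((i : Nat) : Int) := by push_cast; ring
    rw [List.foldl_cons, hstep]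
    have hi1 : i + 1 < T.length := by omega
    have hdrop : T.drop (i + 1) = T[i + 1] :: T.drop (i + 2) := List.drop_eq_getElem_cons hi1
    have htg : tg T (i + 1) = T[i + 1] := by
      simp [tg, List.getD_eq_getElem?_getD, List.getElem?_eq_getElem hi1]
    have hm2 : ∀ x ∈ T.drop (i + 2), x ≤ m := hm
    by_cases hgt : tg T (i + 1) > m
    · have hmono : S.countP (fun x => decide (x < m))
          ≤ S.countP (fun x => decide (x < tg T (i + 1))) := by
        apply List.countP_mono_left
        intro x _
        simp only [decide_eq_true_eq]
        omega
      have hadv : bAdvance S (tg T (i + 1)) p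
          = S.countP (fun x => decide (x < tg T (i + 1))) :=
        bAdvance_eq S (tg T (i + 1)) p hSpair (by omega)
      have hmstrict : ∀ x ∈ T.drop (i + 2), x < tg T (i + 1) := by
        intro x hx
        have := hm2 x hx
        omega
      have hcount : ((S.countP (fun x => decide (x < tg T (i + 1)))) : Int)
          = cnt T (i + 1) + ((T.length : Int) - (i : Int) - 2) := by
        rw [hSperm.countP_eq]
        unfold cnt
        exact countLt_leader T i hi1 (tg T (i + 1)) rfl hmstrict
      have hc : ((bAdvance S (tg T (i + 1)) p : Nat) : Int)
          - ((T.length : Int) - 1 - ((i + 1 : Nat) : Int)) = cnt T (i + 1) := by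
        rw [hadv, hcount]
        push_cast
        ring
      have hif : (if cnt T (i + 1) > best then cnt T (i + 1) else best)
          = max best (cnt T (i + 1)) := by omega
      have hred : bStep T S (best, m, p) ((i + 1 : Nat) : Int)
          = (max best (cnt T (i + 1)), tg T (i + 1), bAdvance S (tg T (i + 1)) p) := by
        unfold bStep
        simp only [hel]
        rw [if_pos hgt, hc, hif]
      have hm' : ∀ x ∈ T.drop (i + 1), x ≤ tg T (i + 1) := by
        intro x hx
        rw [hdrop] at hx
        rcases List.mem_cons.mp hx with h | h
        · rw [h, htg]
        · have := hmstrict x h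
          omega
      have hp' : bAdvance S (tg T (i + 1)) p
          ≤ S.countP (fun x => decide (x < tg T (i + 1))) := le_of_eq hadv
      rw [hred, ih _ _ _ hi1 hm' hp' (le_trans hbest (le_max_left _ _)),
        descMax, if_pos hgt]
      have := cnt_nonneg T (i + 1)
      omega
    · have hred : bStep T S (best, m, p) ((i + 1 : Nat) : Int) = (best, m, p) := by
        unfold bStep
        simp only [hel]
        rw [if_neg hgt]
      have hmnew : ∀ x ∈ T.drop (i + 1), x ≤ m := by
        intro x hx
        rw [hdrop] at hx
        rcases List.mem_cons.mp hx with h | h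
        · rw [h, ← htg]; omega
        · exact hm2 x h
      rw [hred, ih _ _ _ hi1 hmnew hp hbest, descMax, if_neg hgt]

-- ===== VERDICT (by name: the statement is the Claim_ definition above) =====
theorem maxrank_spec : Claim_equal_maxrank := by
  intro T _ hpre
  show maxrank T = maxrank_alt T
  have halt : maxrank_alt T
      = ((PySem.List.pyRange ((T.length : Int) - 2) 0 (-1)).foldl
          (bStep T (PySem.List.sorted T (fun x => x) false))
          (0, PySem.List.pyGetD T (-1) 0, 0)).1 := rfl
  have hn : 1 ≤ T.length := List.length_pos_of_ne_nil hpre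
  rcases Nat.lt_or_ge T.length 2 with h2 | h2
  · have h1 : T.length = 1 := by omega
    unfold maxrank
    rw [halt, h1]
    norm_num
    simp [maxrankLoop]
  · obtain ⟨k, hk⟩ : ∃ k, T.length = k + 2 := ⟨T.length - 2, by omega⟩
    have hks : T.length - 1 = k + 1 := by omega
    have hki : ((T.length : Int) - 1) = ((k + 1 : Nat) : Int) := by rw [hk]; push_cast; ring
    have hm0 : PySem.List.pyGetD T ((T.length : Int) - 1) 0 = tg T (k + 1) := by
      rw [hki, PySem.List.pyGetD_natCast]; rfl
    have hm1 : PySem.List.pyGetD T (-1) 0 = tg T (k + 1) := by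
      have hneg : (-1 : Int) = -((1 : Nat) : Int) := by norm_num
      rw [hneg, PySem.List.pyGetD_neg_natCast T 1 0 (by norm_num) (by omega)]
      have hlt : T.length - 1 < T.length := by omega
      simp [tg, List.getD_eq_getElem?_getD, hk]
    have hrange : ((T.length : Int) - 2) = ((k : Nat) : Int) := by rw [hk]; push_cast; ring
    unfold maxrank
    rw [halt, hm0, hm1, hks, hrange]
    simp only [maxrankLoop, PySem.List.pyGetD_natCast]
    rw [if_pos (by positivity : ((k + 1 : Nat) : Int) > 0),
      if_neg (by simp [tg] : ¬(((k + 1 : Nat) : Int) > 0 ∧ T.getD (k + 1) 0 > tg T (k + 1)))]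
    have hmax00 : max (0 : Int) 0 = 0 := by norm_num
    rw [hmax00, loopA_eq T k (tg T (k + 1)) 0 (by omega) le_rfl]
    rw [foldB T (PySem.List.sorted T (fun x => x) false) rfl k 0 (tg T (k + 1)) 0
      (by omega)
      (by
        intro x hx
        rw [List.drop_eq_getElem_cons (show k + 1 < T.length by omega),
          List.drop_eq_nil_of_le (by omega)] at hx
        rw [List.mem_singleton.mp hx]
        simp [tg, List.getD_eq_getElem?_getD,
          List.getElem?_eq_getElem (show k + 1 < T.length by omega)])
      (by omega) le_rfl]
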